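/- GENERATED by mk_final_copies.py from the proof of the farm's unit `start_decoder.5` (farm:start_decoder.5.2: Lemmas.lean) as the
   re-elaboration sweep compiled it — do not edit. -/
import Asan.CheckWalk
import Vorbis.Spec.Units.start_decoder_5
import Vorbis.Spec.StartDecoderATest
import Vorbis.Spec.StartDecoderBTest

open X86 X86.User Asan Vorbis Vorbis.Spec Vorbis.Spec.StartDecoder

set_option maxRecDepth 4000
set_option maxHeartbeats 4000000

namespace Vorbis.Spec.start_decoder_5

/-- The numbers of the frame: `R + 1480 = RA`, `R` a multiple of 8, the function's stack inside `[700000H, 800000H)`. -/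
theorem frame_nums {u₀ : State} {g : Ghost} {pc : Word} {A : Arena × List Obj} {v : State} (hf : Frame u₀ g pc A v) :
    g.R + 1480 = g.RA ∧ g.R % 8 = 0 ∧ 0x700000 + 1888 ≤ g.RA ∧ g.RA + 8 ≤ 0x800000 := by
  obtain ⟨h1, h2⟩ := hf.r_eq
  obtain ⟨_, h3, h4⟩ := hf.ra
  simp only [steady] at h1
  simp only [depth] at h3
  exact ⟨h1, h2, h3, h4⟩

/-- **Where `*f` is**: above the text, inside the data space, and off start_decoder's own stack `[RA − 1888, RA + 8)` (it is an
object of a CALLER's protected frame, or no stack object at all). -/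
theorem obj_where5 {u₀ : State} {g : Ghost} {pc : Word} {A : Arena × List Obj} {v : State} (hf : Frame u₀ g pc A v)
    (hh : g.Hand A) :
    0x119d40 ≤ g.f ∧ g.f + 1808 ≤ 0xC00000 ∧ (g.RA + 8 ≤ g.f ∨ g.f + 1808 ≤ 0x700000 ∨ 0x800000 ≤ g.f) := by
  have hw := (hh.obj.mono (sub_frames' g A)).where_ hf.shadow hf.offText (by decide)
  simp only [Off.sizeof.stb_vorbis] at hw
  obtain ⟨w1, w2, _⟩ := hw
  refine ⟨w1, w2, ?_⟩
  obtain ⟨o, ho, h1, h2⟩ := hh.obj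
  simp only [Off.sizeof.stb_vorbis] at h2
  rcases List.mem_append.mp ho with hs | hoth
  · unfold stackObjs at hs
    obtain ⟨bF, hbF, hin⟩ := List.mem_flatMap.mp hs
    have hmem : bF ∈ g.frames' := by
      unfold Ghost.frames'
      exact List.mem_cons_of_mem _ hbF
    obtain ⟨k1, k2, _, _, _⟩ := hf.shadow.stack.active bF hmem
    have hg := FrameLayout.objsAt_gran k1 k2 hin
    have hc := hf.callers bF hbF
    have e1 : o.gLo = o.base / 8 := rfl
    left
    omega
  · have hoff := hf.shadow.off o hoth
    unfold OffStack at hoff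
    omega

/-- **The common part of a cut point, re-established after a stretch of code** that left alone the slot of the shadow index, the
saved registers and the return address, the global `log2_4`, and wrote inside the function's footprint only. -/
theorem frame_step {u₀ : State} {g : Ghost} {pc pc' : Word} {A A' : Arena × List Obj} {v s : State}
    (hf : Frame u₀ g pc A v) (hrip : s.rip = pc') (hrsp : s.reg .rsp = addr g.R)
    (hidx : Mem.EqOn (g.R + 8) (g.R + 16) v.mem s.mem)
    (hsaved : Mem.EqOn (g.R + 0x598) (g.R + 0x5d0) v.mem s.mem)
    (hlog : Mem.EqOn 0x120640 0x120650 v.mem s.mem)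
    (hcode : CodeOK u₀ s.mem) (hinv : abiInv s)
    (hshadow : ShadowInv A'.2 g.frames' g.R s.mem)
    (hoff : ∀ o, o ∈ A'.2 → L.textHi ≤ o.base) (hext : g.A0.1.Extends A'.1)
    (hsame : Mem.SameExcept (footprint g) v.mem s.mem) : Frame u₀ g pc' A' s := by
  obtain ⟨n1, n2, n3, n4⟩ := frame_nums hf
  have hR : g.R + 0x5d0 ≤ 2 ^ 64 := by omega
  refine
    { entry := hf.entry
      rip := hrip
      rsp := hrsp
      shadowIdx := ?_
      saved_rbx := ?_
      saved_rbp := ?_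
      saved_r12 := ?_
      saved_r13 := ?_
      saved_r14 := ?_
      saved_r15 := ?_
      saved_ra := ?_
      code := hcode
      inv := hinv
      shadow := hshadow
      offText := hoff
      ext := hext
      callers := hf.callers
      sh7 := ?_
      same := hf.same.trans hsame }
  · rw [hidx.u64 (g.R + 8) (by omega) (by omega) (by omega)]
    exact hf.shadowIdx
  · rw [hsaved.u64 (g.R + 0x598) (by omega) (by omega) (by omega)]
    exact hf.saved_rbx
  · rw [hsaved.u64 (g.R + 0x5a0) (by omega) (by omega) (by omega)]
    exact hf.saved_rbp
  · rw [hsaved.u64 (g.R + 0x5a8) (by omega) (by omega) (by omega)]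
    exact hf.saved_r12
  · rw [hsaved.u64 (g.R + 0x5b0) (by omega) (by omega) (by omega)]
    exact hf.saved_r13
  · rw [hsaved.u64 (g.R + 0x5b8) (by omega) (by omega) (by omega)]
    exact hf.saved_r14
  · rw [hsaved.u64 (g.R + 0x5c0) (by omega) (by omega) (by omega)]
    exact hf.saved_r15
  · rw [hsaved.u64 (g.R + 0x5c8) (by omega) (by omega) (by omega)]
    exact hf.saved_ra
  · intro i hi
    have e : Vorbis.Globals.log2_4.beg = 0x120640 := rfl
    have ht : (UInt64.ofNat (Vorbis.Globals.log2_4.beg + i)).toNat = 0x120640 + i := by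
      rw [e]
      exact toNat_addr _ (by omega)
    rw [hlog.readLE _ 1 (by omega) (by omega) (by omega)]
    exact hf.sh7 i hi

/-- The windows of `*f` that the point `SD 1` reads besides `Bits`, the arena fields and the three comment fields: `sample_rate`,
`channels`; `blocksize_0` … the zero rest up to the paging fields; `first_decode`; `discard_samples_deferred`. -/
def sdWins5 : Wins := [(0, 8), (152, 1480), (1749, 1750), (1784, 1788)]

/-- **The weak point `SDw 1` in another memory, for another ghost arena** (`A' = A`: a frame lemma; `A'` = the arena after an
allocation: the callee's return): the windows `sdWins5` of `*f` read the same; the environment, the frame constants, the arena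
layer and `Bits` are given for the new memory. -/
theorem sdw_move {len : Nat} {A A' : Arena × List Obj} {Blk Blk' : Block → Prop} {Live Live' : Nat → Prop} {mem mem' : Mem}
    {f R : Nat} (h : SDw len 1 A Blk Live mem f R) (henv : Env Blk' Live' mem') (he : ObjEq sdWins5 mem f mem' f)
    (hconsts : SDFrameConsts 1 mem' R) (harena : ArenaOK A'.1 A'.2 mem' f) (hsetups : ∀ B, A'.1.Blk B → Blk' B)
    (hbits : Bits Blk' len mem' f) : SDw len 1 A' Blk' Live' mem' f R := by
  refine
    { env := henv
      frame := hconsts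
      arena := harena
      setups := hsetups
      bits := hbits
      first := ?_
      discard0 := ?_
      header := ?_
      cb0 := fun h3 => absurd h3 (by omega)
      rest := ?_ }
  · have e : stb_vorbis.first_decode mem' f = stb_vorbis.first_decode mem f := by
      simp only [vacc, voff]
      exact he.u8 1749 (by decide)
    rw [e]
    exact h.first
  · have e : stb_vorbis.discard_samples_deferred mem' f = stb_vorbis.discard_samples_deferred mem f := by
      simp only [vacc, voff]
      exact he.i32 1784 (by decide)
    rw [e]
    exact h.discard0
  · intro h1
    apply (h.header h1).transfer
    exact he.sub (by decide)
  · intro o ho1 ho2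
    have hz := h.rest o ho1 ho2
    simp only [restFrom, voff] at ho1 ho2
    simp only [Nat.reduceLeDiff, if_true] at ho1
    rw [he (152, 1480) (by decide) o (by simp only []; omega) (by simp only []; omega)]
    exact hz

/-- **FRAME of the weak point `SDw 1`** (same ghost arena, the shadow left alone). -/
theorem sdw_frame {len : Nat} {A : Arena × List Obj} {Blk : Block → Prop} {Live : Nat → Prop} {mem mem' : Mem} {f R : Nat}
    (h : SDw len 1 A Blk Live mem f R) (he : ObjEq sdWins5 mem f mem' f) (hconsts : SDFrameConsts 1 mem' R)
    (hsh : Mem.EqOn 0xC00000 0xE00000 mem mem') (harena : ArenaOK A.1 A.2 mem' f) (hbits : Bits Blk len mem' f) :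
    SDw len 1 A Blk Live mem' f R :=
  sdw_move h (h.env.eqOn hsh) he hconsts harena h.setups hbits

/-- A zero range of `*f` that was not written is still zero. -/
theorem zero_frame {mem mem' : Mem} {f lo hi : Nat} (h : ZeroRange mem f lo hi) (he : ObjEq [(lo, hi)] mem f mem' f) :
    ZeroRange mem' f lo hi := by
  intro o ho1 ho2
  rw [he (lo, hi) List.mem_cons_self o ho1 ho2]
  exact h o ho1 ho2

/-- **FRAME of the point `SD 1`**: `sdw_frame` and the three comment fields still zero. -/
theorem sd1_frame {len : Nat} {A : Arena × List Obj} {Blk : Block → Prop} {Live : Nat → Prop} {mem mem' : Mem} {f R : Nat}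
    (h : Real.SD len 1 A Blk Live mem f R) (he : ObjEq sdWins5 mem f mem' f) (hz : ObjEq [(24, 48)] mem f mem' f)
    (hconsts : SDFrameConsts 1 mem' R)
    (hsh : Mem.EqOn 0xC00000 0xE00000 mem mem') (harena : ArenaOK A.1 A.2 mem' f) (hbits : Bits Blk len mem' f) :
    Real.SD len 1 A Blk Live mem' f R := by
  refine SDw.toSD (sdw_frame (SDw.of_sd h) he hconsts hsh harena hbits) (by omega) h.noTemps ?_ (fun h2 => absurd h2 (by omega))
  intro _
  have hz0 := h.commentZero (by omega)
  simp only [voff] at hz0 ⊢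
  exact zero_frame hz0 hz

/-- **A span the segment may write between two cut points without disturbing what `Frame` and `SD 1` read**: it misses the frame
constants `[R + 8, R + 28H)`, the saved registers and the return address, the global `log2_4`, the windows `sdWins5` of `*f`; and it
lies in the function's stack or in `*f` (its footprint). NOT in it (they differ between the paths): the three comment fields, the
arena fields, the shadow. -/
def Quiet (g : Ghost) (w : Span) : Prop :=
  (w.hi ≤ g.R + 8 ∨ g.R + 0x28 ≤ w.lo) ∧ (w.hi ≤ g.R + 0x598 ∨ g.R + 0x5d0 ≤ w.lo) ∧
  (w.hi ≤ 0x120640 ∨ 0x120650 ≤ w.lo) ∧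
  ((g.RA - 1888 ≤ w.lo ∧ w.hi ≤ g.RA) ∨ (g.f ≤ w.lo ∧ w.hi ≤ g.f + 1808)) ∧
  (w.hi ≤ g.f ∨ g.f + 8 ≤ w.lo) ∧ (w.hi ≤ g.f + 152 ∨ g.f + 1480 ≤ w.lo) ∧
  (w.hi ≤ g.f + 1749 ∨ g.f + 1750 ≤ w.lo) ∧ (w.hi ≤ g.f + 1784 ∨ g.f + 1788 ≤ w.lo)

/-- The windows `sdWins5` of `*f` read the same over quiet spans. -/
theorem quiet_objEq {g : Ghost} {ws : List Span} {m m' : Mem} (hs : Mem.SameExcept ws m m') (hq : ∀ w, w ∈ ws → Quiet g w)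
    (hf : g.f + 1808 ≤ 2 ^ 64) : ObjEq sdWins5 m g.f m' g.f := by
  apply ObjEq.of_sameExcept hs
  · intro w hw
    simp only [sdWins5, List.mem_cons, List.mem_nil_iff, or_false] at hw
    rcases hw with rfl | rfl | rfl | rfl <;> simp only [] <;> omega
  · intro w hw sp hsp
    obtain ⟨_, _, _, _, q1, q2, q3, q4⟩ := hq sp hsp
    simp only [sdWins5, List.mem_cons, List.mem_nil_iff, or_false] at hw
    rcases hw with rfl | rfl | rfl | rfl <;> simp only [] <;> omega

/-- One window `[lo, hi)` of `*f` reads the same over spans that miss it. -/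
theorem window_objEq {f lo hi : Nat} {ws : List Span} {m m' : Mem} (hs : Mem.SameExcept ws m m')
    (hq : ∀ w, w ∈ ws → w.hi ≤ f + lo ∨ f + hi ≤ w.lo) (hf : f + hi ≤ 2 ^ 64) : ObjEq [(lo, hi)] m f m' f := by
  apply ObjEq.of_sameExcept hs
  · intro w hw
    rw [List.mem_singleton.mp hw]
    exact hf
  · intro w hw sp hsp
    rw [List.mem_singleton.mp hw]
    have := hq sp hsp
    simp only []
    omega

/-- The frame constants over quiet spans. -/
theorem quiet_consts {g : Ghost} {ws : List Span} {m m' : Mem} (h : SDFrameConsts 1 m g.R) (hs : Mem.SameExcept ws m m')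
    (hq : ∀ w, w ∈ ws → Quiet g w) (hR : g.R + 0x28 ≤ 2 ^ 64) : SDFrameConsts 1 m' g.R := by
  apply h.frame ?_ hR
  apply hs.eqOn
  intro w hw
  obtain ⟨q, _⟩ := hq w hw
  omega

/-- **The common part of a cut point over quiet spans** (the shadow layer, the ghost arena and the object list of the new point given). -/
theorem quiet_frame {u₀ : State} {g : Ghost} {pc pc' : Word} {A A' : Arena × List Obj} {v s : State} {ws : List Span}
    (hf : Frame u₀ g pc A v) (hs : Mem.SameExcept ws v.mem s.mem) (hq : ∀ w, w ∈ ws → Quiet g w)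
    (hrip : s.rip = pc') (hrsp : s.reg .rsp = addr g.R) (hcode : CodeOK u₀ s.mem) (hinv : abiInv s)
    (hshadow : ShadowInv A'.2 g.frames' g.R s.mem) (hoff : ∀ o, o ∈ A'.2 → L.textHi ≤ o.base)
    (hext : g.A0.1.Extends A'.1) : Frame u₀ g pc' A' s := by
  refine frame_step hf hrip hrsp ?_ ?_ ?_ hcode hinv hshadow hoff hext ?_
  · apply hs.eqOn
    intro w hw
    obtain ⟨q, _⟩ := hq w hw
    omega
  · apply hs.eqOn
    intro w hw
    obtain ⟨_, q, _⟩ := hq w hw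
    omega
  · apply hs.eqOn
    intro w hw
    obtain ⟨_, _, q, _⟩ := hq w hw
    omega
  · apply hs.mono
    intro w hw a h1 h2
    obtain ⟨_, _, _, q, _⟩ := hq w hw
    rcases q with ⟨q1, q2⟩ | ⟨q1, q2⟩
    · refine ⟨⟨g.RA - depth, g.RA⟩, List.mem_cons_self, ?_, ?_⟩
      · simp only [depth]
        omega
      · simp only []
        omega
    · refine ⟨(objBlock (g.e.reg .rdi).toNat).span, ?_, ?_, ?_⟩
      · unfold footprint writes
        exact List.mem_cons_of_mem _ List.mem_cons_self
      · show g.f ≤ a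
        omega
      · show a < g.f + Off.sizeof.stb_vorbis
        simp only [voff]
        omega

/-- `movsxd r12, r13d` of the loop counter `i ≤ 6`: the counter itself. -/
theorem sext_small (i : Nat) (hi : i ≤ 6) :
    Word.ofBV (BitVec.signExtend 64 (Word.part .w32 (addr i))) = addr i := by
  have h : i = 0 ∨ i = 1 ∨ i = 2 ∨ i = 3 ∨ i = 4 ∨ i = 5 ∨ i = 6 := by omega
  rcases h with rfl | rfl | rfl | rfl | rfl | rfl | rfl <;> decide

/-- `add r13d, 1` of the loop counter `i ≤ 6`. -/
theorem inc_small (i : Nat) (hi : i ≤ 6) :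
    Word.ofBV (Word.part .w32 (addr i) + 1#32) = addr (i + 1) := by
  have h : i = 0 ∨ i = 1 ∨ i = 2 ∨ i = 3 ∨ i = 4 ∨ i = 5 ∨ i = 6 := by omega
  rcases h with rfl | rfl | rfl | rfl | rfl | rfl | rfl <;> decide

/-- `cmp r13d, 5 ; jle` of the loop counter `i ≤ 6`: the signed comparison is the comparison of the numbers. -/
theorem le5_small (i : Nat) (hi : i ≤ 6) :
    ((Word.part .w32 (addr i)).toInt ≤ (5#32).toInt) ↔ i ≤ 5 := by
  have h : i = 0 ∨ i = 1 ∨ i = 2 ∨ i = 3 ∨ i = 4 ∨ i = 5 ∨ i = 6 := by omega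
  rcases h with rfl | rfl | rfl | rfl | rfl | rfl | rfl <;> decide

/-- The frame object `header` (6 bytes at `[R + A0H]`) is a live object inside the function. -/
theorem header_obj (g : Ghost) (A : Arena × List Obj) :
    (⟨g.R + 0x50 + 80, 6, .stack⟩ : Obj) ∈ stackObjs g.frames' ++ A.2 := by
  apply List.mem_append_left
  unfold stackObjs Ghost.frames' Ghost.base
  apply List.mem_flatMap.mpr
  refine ⟨(g.R + 0x50, Vorbis.Frames.start_decoder), List.mem_cons_self, ?_⟩
  unfold FrameLayout.objsAt Vorbis.Frames.start_decoder
  exact List.mem_cons_of_mem _ (List.mem_cons_of_mem _ List.mem_cons_self)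

/-- **The assertion at the interior points of the segment** (after a call returned, before the vendor allocation): the common
part, the hand-over carrier, `rbp = f`, the point `SD 1`. (`Body5` without the loop counter, at any program counter.) -/
structure AtInterior (u₀ : State) (g : Ghost) (A : Arena × List Obj) (pc : Word) (t : State) : Prop where
  frame : Frame u₀ g pc A t
  hand : g.Hand A
  rbp : t.reg .rbp = addr g.f
  sd : Real.SD g.len 1 A (g.Blk A) (g.Live A) t.mem g.f g.R

/-- The loop head's assertion gives the interior one. -/
theorem AtInterior.of_body {u₀ : State} {g : Ghost} {A : Arena × List Obj} {i : Nat} {v : State} (h : Body5 u₀ g A i v) :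
    AtInterior u₀ g A pc_5 v :=
  ⟨h.frame, h.hand, h.rbp, h.sd⟩

/-- **A quiet span that also misses the three comment fields and the four arena fields of `*f`**: every store of the segment
before the vendor allocation (pushed return addresses, the readers' windows, `f->error`, the bytes of `header`). -/
def Quiet2 (g : Ghost) (w : Span) : Prop :=
  Quiet g w ∧ (w.hi ≤ g.f + 24 ∨ g.f + 48 ≤ w.lo) ∧ (w.hi ≤ g.f + 112 ∨ g.f + 136 ≤ w.lo)

/-- **From one interior point to the next** over spans that are `Quiet2` and a stretch of code that wrote no shadow byte; `Bits` of
the new memory is given (a reader's post, or `Bits.frame_fields`). -/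
theorem AtInterior.step {u₀ : State} {g : Ghost} {A : Arena × List Obj} {pc pc' : Word} {t s : State} {ws : List Span}
    (h : AtInterior u₀ g A pc t) (hs : Mem.SameExcept ws t.mem s.mem) (hq : ∀ w, w ∈ ws → Quiet2 g w)
    (hun : ShadowUntouched t.mem s.mem) (hbits : Bits (g.Blk A) g.len s.mem g.f)
    (hrip : s.rip = pc') (hrsp : s.reg .rsp = addr g.R) (hcode : CodeOK u₀ s.mem) (hinv : abiInv s)
    (hrbp : s.reg .rbp = addr g.f) : AtInterior u₀ g A pc' s := by
  obtain ⟨n1, n2, n3, n4⟩ := frame_nums h.frame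
  have obr := h.sd.bits.OBR
  simp only [voff] at obr
  have hq1 : ∀ w, w ∈ ws → Quiet g w := fun w hw => (hq w hw).1
  have hfr' : Frame u₀ g pc' A s :=
    quiet_frame h.frame hs hq1 hrip hrsp hcode hinv (h.frame.shadow.untouched hun) h.frame.offText h.frame.ext
  have harena : ArenaOK A.1 A.2 s.mem g.f := by
    apply h.sd.arena.transfer
    apply window_objEq hs ?_ (by omega)
    intro w hw
    exact (hq w hw).2.2
  have hz : ObjEq [(24, 48)] t.mem g.f s.mem g.f := by
    apply window_objEq hs ?_ (by omega)
    intro w hw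
    exact (hq w hw).2.1
  exact ⟨hfr', h.hand, hrbp,
    sd1_frame h.sd (quiet_objEq hs hq1 (by omega)) hz (quiet_consts h.sd.frame hs hq1 (by omega)) hun harena hbits⟩

/-- **An error exit**: at the epilogue 0x113b22 with eax = 0 the interior assertion is SD.ERR. -/
theorem AtInterior.err {u₀ : State} {g : Ghost} {A : Arena × List Obj} {s : State} (h : AtInterior u₀ g A pc_ERR s)
    (hrax : s.reg .rax = 0) : AtERR u₀ g s := by
  refine ⟨A, h.frame, h.hand, Or.inl ⟨?_, Failed.of_sd h.sd⟩⟩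
  rw [hrax]
  rfl

/-- `Bits` over spans that miss the four windows `Bits` reads (`stream` … `stream_end`, `segment_count`, `next_seg`, `valid_bits`). -/
theorem bits_quiet {Blk : Block → Prop} {len : Nat} {m m' : Mem} {f : Nat} {ws : List Span} (hb : Bits Blk len m f)
    (hs : Mem.SameExcept ws m m')
    (hq : ∀ w, w ∈ ws → (w.hi ≤ f + 48 ∨ f + 72 ≤ w.lo) ∧ (w.hi ≤ f + 1488 ∨ f + 1492 ≤ w.lo) ∧
      (w.hi ≤ f + 1752 ∨ f + 1756 ≤ w.lo) ∧ (w.hi ≤ f + 1768 ∨ f + 1772 ≤ w.lo)) : Bits Blk len m' f := by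
  apply hb.frame_fields
  apply Bits.SameFields.of_sameExcept hs
  · intro w hw
    have := hq w hw
    omega
  · intro w hw
    have := hq w hw
    omega
  · intro w hw
    have := hq w hw
    omega
  · intro w hw
    have := hq w hw
    omega

/-- The windows `sdWins5` of `*f` read the same over spans that miss them (no condition on where else the spans lie: the
allocator's shadow span). -/
theorem sd_objEq {f : Nat} {ws : List Span} {m m' : Mem} (hs : Mem.SameExcept ws m m')
    (hq : ∀ w, w ∈ ws → (w.hi ≤ f ∨ f + 8 ≤ w.lo) ∧ (w.hi ≤ f + 152 ∨ f + 1480 ≤ w.lo) ∧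
      (w.hi ≤ f + 1749 ∨ f + 1750 ≤ w.lo) ∧ (w.hi ≤ f + 1784 ∨ f + 1788 ≤ w.lo))
    (hf : f + 1808 ≤ 2 ^ 64) : ObjEq sdWins5 m f m' f := by
  apply ObjEq.of_sameExcept hs
  · intro w hw
    simp only [sdWins5, List.mem_cons, List.mem_nil_iff, or_false] at hw
    rcases hw with rfl | rfl | rfl | rfl <;> simp only [] <;> omega
  · intro w hw sp hsp
    obtain ⟨q1, q2, q3, q4⟩ := hq sp hsp
    simp only [sdWins5, List.mem_cons, List.mem_nil_iff, or_false] at hw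
    rcases hw with rfl | rfl | rfl | rfl <;> simp only [] <;> omega

/-- **The environment of a check site after `setup_malloc` returned a block** (the ghost arena grew to `A'`, one more live
object): the shadow covers the new live set (the callee's post), the run's block predicate is lawful and its blocks are live. -/
theorem env_grow {g : Ghost} {A A' : Arena × List Obj} {mem mem' : Mem} {top : Nat}
    (henv : Env (g.Blk A) (g.Live A) mem) (hh : g.Hand A') (harena : ArenaOK A'.1 A'.2 mem' g.f)
    (hsh : ShadowInv A'.2 g.frames' top mem') (hsub : ∀ o, o ∈ A.2 → o ∈ A'.2) :
    Env (g.Blk A') (g.Live A') mem' := by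
  have hx : BlkOK (listBlk g.extra) := henv.ok.sub (fun B hB => runBlk_extra hB)
  have hxl : BlkLive (listBlk g.extra) (g.Live A) := henv.live.sub (fun B hB => runBlk_extra hB)
  refine ⟨hsh.shadow.covers, ?_, ?_⟩
  · apply harena.runBlk_ok hx
    intro C hC
    rcases List.mem_cons.mp hC with rfl | hm
    · exact hh.objOut
    · exact hh.outside C hm
  · apply harena.runBlk_live (fun o ho => List.mem_append_right _ ho)
    refine BlkLive.mono hxl (Live' := Live (stackObjs g.frames' ++ A'.2)) ?_
    intro x hx
    obtain ⟨o, ho, hb⟩ := hx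
    refine ⟨o, ?_, hb⟩
    rcases List.mem_append.mp ho with h1 | h2
    · exact List.mem_append_left _ h1
    · exact List.mem_append_right _ (hsub o h2)

/-- **The assertion after `setup_malloc(f, len + 1)` returned** (0x113eab; C line 3680), for the ghost arena `A'` of the moment (grown
by the vendor block on success) and the vendor length `len` (FIX 1: `≤ 7FFFFFFEH`): the weak point `SDw 1`, the three comment
fields still zero, `r13 = len`, and the result: NULL, or the arena's new block of exactly `len + 1` bytes. -/
structure AtAlloc (u₀ : State) (g : Ghost) (A' : Arena × List Obj) (len : Nat) (t : State) : Prop where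
  frame : Frame u₀ g Vorbis.L.start_decoder.cut45 A' t
  hand : g.Hand A'
  rbp : t.reg .rbp = addr g.f
  sd : SDw g.len 1 A' (g.Blk A') (g.Live A') t.mem g.f g.R
  noTemps : A'.1.temps = []
  zero : ZeroRange t.mem g.f 24 48
  r13 : t.reg .r13 = addr len
  len_le : len ≤ 0x7ffffffe
  result : t.reg .rax = 0 ∨ ((t.reg .rax).toNat ≠ 0 ∧ A'.1.Blk ⟨(t.reg .rax).toNat, len + 1⟩)

/-- A 32-bit value in a 64-bit register: its low half is the whole. -/
theorem part32_small (z : Word) (h : z.toNat < 2 ^ 32) : (Word.part .w32 z).toNat = z.toNat := by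
  unfold Word.part
  simp only [Width.bits, BitVec.toNat_setWidth, UInt64.toNat_toBitVec]
  omega

/-- `lea esi, [rax+1]` after FIX 1 (`len ≤ 7FFFFFFEH`): the size argument of `setup_malloc` is `len + 1`. -/
theorem size_arg (z : Word) (h : z.toNat ≤ 0x7ffffffe) :
    (Word.ofBV (BitVec.setWidth 32 (z + 1).toBitVec)).toNat % 2 ^ 32 = z.toNat + 1 := by
  unfold Word.ofBV
  simp only [UInt64.toNat_ofBitVec, BitVec.toNat_setWidth, UInt64.toNat_toBitVec, UInt64.toNat_add, UInt64.toNat_one]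
  omega

/-- The footprint of `call setup_malloc` seen from the cut point before it: the pushed return address and the callee's stack,
`setup_memory_required`, `setup_offset`, the shadow of the new block of `n` bytes. -/
def allocSpans (g : Ghost) (A : Arena) (n : Nat) : List Span :=
  [⟨g.R - 88, g.R⟩, ⟨g.f + 8, g.f + 12⟩, ⟨g.f + 128, g.f + 132⟩, shadowSpan (A.B + A.S + 32) (A.B + A.S + 32 + n)]

/-- **`setup_malloc(f, n)` SUCCEEDED** (`A.Fits n`): the common part, the hand-over carrier and the weak point `SDw 1` for the grown
ghost arena `A.1.pushSetup n` and the object list with the new block; the three comment fields still zero; the new block is a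
block of the grown arena. -/
theorem alloc_success {u₀ : State} {g : Ghost} {A : Arena × List Obj} {pc pc' : Word} {v r : State} {n : Nat}
    (hm : AtInterior u₀ g A pc v) (hs : Mem.SameExcept (allocSpans g A.1 n) v.mem r.mem) (hfit : A.1.Fits n)
    (harena : ArenaOK (A.1.pushSetup n) (A.1.newSetupObj n :: A.2) r.mem g.f)
    (hsh : ShadowInv (A.1.newSetupObj n :: A.2) g.frames' g.R r.mem)
    (hrip : r.rip = pc') (hrsp : r.reg .rsp = addr g.R) (hcode : CodeOK u₀ r.mem) (hinv : abiInv r) :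
    Frame u₀ g pc' (A.1.pushSetup n, A.1.newSetupObj n :: A.2) r ∧
      g.Hand (A.1.pushSetup n, A.1.newSetupObj n :: A.2) ∧
      SDw g.len 1 (A.1.pushSetup n, A.1.newSetupObj n :: A.2) (g.Blk (A.1.pushSetup n, A.1.newSetupObj n :: A.2))
        (g.Live (A.1.pushSetup n, A.1.newSetupObj n :: A.2)) r.mem g.f g.R ∧
      ZeroRange r.mem g.f 24 48 ∧ (A.1.pushSetup n).Blk ⟨A.1.B + (A.1.S + 32), n⟩ := by
  obtain ⟨n1, n2, n3, n4⟩ := frame_nums hm.frame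
  obtain ⟨o1, o2, o3⟩ := obj_where5 hm.frame hm.hand
  have obr := hm.sd.bits.OBR
  simp only [voff] at obr
  have ha := hm.sd.arena
  obtain ⟨a1, a2, a3, a4⟩ := ha.AR1
  obtain ⟨b1, b2, _, _⟩ := ha.AR2
  have hfit' : A.1.S + 32 + r8 n ≤ A.1.T := hfit
  have hr8 := le_r8 n
  have hext := A.1.extends_pushSetup n
  have eB := hm.frame.ext.B
  have eL := hm.frame.ext.L
  have hsub : ∀ o, o ∈ A.2 → o ∈ A.1.newSetupObj n :: A.2 := fun o ho => List.mem_cons_of_mem _ ho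
  have hh' : g.Hand (A.1.pushSetup n, A.1.newSetupObj n :: A.2) := HandOK.mono hm.hand hext hsub
  -- every span of the footprint, against the slots and windows that must stay
  have hmiss : ∀ w, w ∈ allocSpans g A.1 n →
      (w.hi ≤ g.R + 8 ∨ g.R + 0x28 ≤ w.lo) ∧ (w.hi ≤ g.R + 0x598 ∨ g.R + 0x5d0 ≤ w.lo) ∧
      (w.hi ≤ 0x120640 ∨ 0x120650 ≤ w.lo) ∧
      (w.hi ≤ g.f ∨ g.f + 8 ≤ w.lo) ∧ (w.hi ≤ g.f + 152 ∨ g.f + 1480 ≤ w.lo) ∧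
      (w.hi ≤ g.f + 1749 ∨ g.f + 1750 ≤ w.lo) ∧ (w.hi ≤ g.f + 1784 ∨ g.f + 1788 ≤ w.lo) ∧
      (w.hi ≤ g.f + 24 ∨ g.f + 48 ≤ w.lo) ∧
      (w.hi ≤ g.f + 48 ∨ g.f + 72 ≤ w.lo) ∧ (w.hi ≤ g.f + 1488 ∨ g.f + 1492 ≤ w.lo) ∧
      (w.hi ≤ g.f + 1752 ∨ g.f + 1756 ≤ w.lo) ∧ (w.hi ≤ g.f + 1768 ∨ g.f + 1772 ≤ w.lo) := by
    simp only [allocSpans, List.forall_mem_cons, List.not_mem_nil, false_imp_iff, implies_true, and_true, shadowSpan]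
    omega
  have hfr' : Frame u₀ g pc' (A.1.pushSetup n, A.1.newSetupObj n :: A.2) r := by
    refine frame_step hm.frame hrip hrsp ?_ ?_ ?_ hcode hinv hsh ?_ (hm.frame.ext.trans hext) ?_
    · apply hs.eqOn
      intro w hw
      have := hmiss w hw
      omega
    · apply hs.eqOn
      intro w hw
      have := hmiss w hw
      omega
    · apply hs.eqOn
      intro w hw
      have := hmiss w hw
      omega
    · intro o ho
      rcases List.mem_cons.mp ho with rfl | ho'
      · have ht := hm.hand.arenaText
        show L.textHi ≤ A.1.B + (A.1.S + 32)
        omega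
      · exact hm.frame.offText o ho'
    · apply hs.mono
      simp only [allocSpans, List.forall_mem_cons, List.not_mem_nil, false_imp_iff, implies_true, and_true]
      refine ⟨?_, ?_, ?_, ?_⟩
      · intro a h1 h2
        refine ⟨⟨g.RA - depth, g.RA⟩, List.mem_cons_self, ?_, ?_⟩
        · simp only [depth]
          omega
        · simp only []
          omega
      · intro a h1 h2
        refine ⟨(objBlock (g.e.reg .rdi).toNat).span, List.mem_cons_of_mem _ List.mem_cons_self, ?_, ?_⟩
        · show g.f ≤ a
          omega
        · show a < g.f + Off.sizeof.stb_vorbis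
          simp only [voff]
          omega
      · intro a h1 h2
        refine ⟨(objBlock (g.e.reg .rdi).toNat).span, List.mem_cons_of_mem _ List.mem_cons_self, ?_, ?_⟩
        · show g.f ≤ a
          omega
        · show a < g.f + Off.sizeof.stb_vorbis
          simp only [voff]
          omega
      · intro a h1 h2
        refine ⟨shadowSpan g.A0.1.B (g.A0.1.B + g.A0.1.L), ?_, ?_, ?_⟩
        · unfold footprint writes
          exact List.mem_cons_of_mem _ (List.mem_cons_of_mem _ (List.mem_cons_of_mem _ (List.mem_cons_of_mem _
            List.mem_cons_self)))
        · simp only [shadowSpan] at h1 h2 ⊢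
          omega
        · simp only [shadowSpan] at h1 h2 ⊢
          omega
  have henv' := env_grow hm.sd.env hh' harena hsh hsub
  have hbits0 : Bits (g.Blk A) g.len r.mem g.f := by
    apply bits_quiet hm.sd.bits hs
    intro w hw
    have := hmiss w hw
    omega
  have hbits' : Bits (g.Blk (A.1.pushSetup n, A.1.newSetupObj n :: A.2)) g.len r.mem g.f :=
    hbits0.reblk (runBlk_mono hext (fun _ h => h) _ hbits0.OB1) (runBlk_mono hext (fun _ h => h) _ hbits0.S2)
  have hobj : ObjEq sdWins5 v.mem g.f r.mem g.f := by
    apply sd_objEq hs ?_ (by omega)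
    intro w hw
    have := hmiss w hw
    omega
  have hconsts : SDFrameConsts 1 r.mem g.R := by
    apply hm.sd.frame.frame ?_ (by omega)
    apply hs.eqOn
    intro w hw
    have := hmiss w hw
    omega
  have hz : ZeroRange r.mem g.f 24 48 := by
    have hz0 := hm.sd.commentZero (by omega)
    simp only [voff] at hz0
    apply zero_frame hz0
    apply window_objEq hs ?_ (by omega)
    intro w hw
    have := hmiss w hw
    omega
  exact ⟨hfr', hh', sdw_move (SDw.of_sd hm.sd) henv' hobj hconsts harena (fun B hB => runBlk_setup hB) hbits', hz,
    (ha.since_pushSetup n).blk⟩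

/-- The footprint of a FAILED `call setup_malloc` seen from the cut point before it, as the strengthened contract gives it (no
shadow window). -/
def failSpans (g : Ghost) : List Span :=
  [⟨g.R - 88, g.R⟩, ⟨g.f + 8, g.f + 12⟩, ⟨g.f + 128, g.f + 132⟩]

/-- **`setup_malloc(f, n)` FAILED** (returned NULL; the arena and the shadow as they were): the common part and the weak point
`SDw 1` for the same ghost arena; the three comment fields still zero. -/
theorem alloc_failure {u₀ : State} {g : Ghost} {A : Arena × List Obj} {pc pc' : Word} {v r : State}
    (hm : AtInterior u₀ g A pc v) (hs : Mem.SameExcept (failSpans g) v.mem r.mem) (hun : ShadowUntouched v.mem r.mem)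
    (harena : ArenaOK A.1 A.2 r.mem g.f)
    (hrip : r.rip = pc') (hrsp : r.reg .rsp = addr g.R) (hcode : CodeOK u₀ r.mem) (hinv : abiInv r) :
    Frame u₀ g pc' A r ∧ SDw g.len 1 A (g.Blk A) (g.Live A) r.mem g.f g.R ∧ ZeroRange r.mem g.f 24 48 := by
  obtain ⟨n1, n2, n3, n4⟩ := frame_nums hm.frame
  obtain ⟨o1, o2, o3⟩ := obj_where5 hm.frame hm.hand
  have obr := hm.sd.bits.OBR
  simp only [voff] at obr
  have hq : ∀ w, w ∈ failSpans g → Quiet g w := by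
    simp only [failSpans, List.forall_mem_cons, List.not_mem_nil, false_imp_iff, implies_true, and_true, Quiet]
    omega
  have hfr' : Frame u₀ g pc' A r :=
    quiet_frame hm.frame hs hq hrip hrsp hcode hinv (hm.frame.shadow.untouched hun) hm.frame.offText hm.frame.ext
  have hbits : Bits (g.Blk A) g.len r.mem g.f := by
    apply bits_quiet hm.sd.bits hs
    simp only [failSpans, List.forall_mem_cons, List.not_mem_nil, false_imp_iff, implies_true, and_true]
    omega
  have hz : ZeroRange r.mem g.f 24 48 := by
    have hz0 := hm.sd.commentZero (by omega)
    simp only [voff] at hz0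
    apply zero_frame hz0
    apply window_objEq hs ?_ (by omega)
    simp only [failSpans, List.forall_mem_cons, List.not_mem_nil, false_imp_iff, implies_true, and_true]
    omega
  exact ⟨hfr', sdw_frame (SDw.of_sd hm.sd) (quiet_objEq hs hq (by omega)) (quiet_consts hm.sd.frame hs hq (by omega)) hun
    harena hbits, hz⟩

/-- **WHAT A FAILED `setup_malloc` WROTE**, in the form the walks below take it as a hypothesis (`seg_c`, `seg5_of_failfix`): on the
FAILURE path (`¬ A.Fits n`) the callee wrote nothing but its stack, `setup_memory_required` and `setup_offset` — in particular
nothing in the window `shadowSpan (B + S + 32) (B + S + 32 + n)` of `setup_malloc.spec.writes`, which for `n` up to 7FFFFFFFH reaches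
far beyond the shadow region `[C00000H, E00000H)` that `ShadowUntouched` speaks of. Since freeze-9 it IS the contract: the last
conjunct of the failure clause of `setup_malloc.spec` (two of these three windows); Proof.lean supplies it from there. -/
def FailFix (g : Ghost) (A : Arena × List Obj) : Prop :=
  ∀ (u w : State), (setup_malloc.spec A.2 g.frames' A.1).post u w →
    Mem.SameExcept ((setup_malloc.spec A.2 g.frames' A.1).footprint u) u.mem w.mem →
    ¬ A.1.Fits ((u.reg .rsi).toNat % 2 ^ 32) →
    Mem.SameExcept [⟨(u.reg .rsp).toNat - 80, (u.reg .rsp).toNat⟩, ⟨(u.reg .rdi).toNat + 8, (u.reg .rdi).toNat + 12⟩,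
      ⟨(u.reg .rdi).toNat + 128, (u.reg .rdi).toNat + 132⟩] u.mem w.mem

/-- **A quiet span that also misses `comment_list_length`, `comment_list`, the arena fields and the windows `Bits` reads**: the
stores after the vendor allocation (a pushed return address, `f->vendor`, `f->error`). -/
def Quiet3 (g : Ghost) (w : Span) : Prop :=
  Quiet g w ∧ (w.hi ≤ g.f + 32 ∨ g.f + 48 ≤ w.lo) ∧ (w.hi ≤ g.f + 112 ∨ g.f + 136 ≤ w.lo) ∧
  (w.hi ≤ g.f + 48 ∨ g.f + 72 ≤ w.lo) ∧ (w.hi ≤ g.f + 1488 ∨ g.f + 1492 ≤ w.lo) ∧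
  (w.hi ≤ g.f + 1752 ∨ g.f + 1756 ≤ w.lo) ∧ (w.hi ≤ g.f + 1768 ∨ g.f + 1772 ≤ w.lo)

/-- **After the vendor allocation, over `Quiet3` spans** (the shadow left alone): the common part, the weak point `SDw 1`,
`comment_list_length` and `comment_list` still zero. -/
theorem AtAlloc.step {u₀ : State} {g : Ghost} {A : Arena × List Obj} {len : Nat} {pc' : Word} {v s : State} {ws : List Span}
    (hm : AtAlloc u₀ g A len v) (hs : Mem.SameExcept ws v.mem s.mem) (hq : ∀ w, w ∈ ws → Quiet3 g w)
    (hun : ShadowUntouched v.mem s.mem)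
    (hrip : s.rip = pc') (hrsp : s.reg .rsp = addr g.R) (hcode : CodeOK u₀ s.mem) (hinv : abiInv s) :
    Frame u₀ g pc' A s ∧ SDw g.len 1 A (g.Blk A) (g.Live A) s.mem g.f g.R ∧ ZeroRange s.mem g.f 32 48 := by
  obtain ⟨n1, n2, n3, n4⟩ := frame_nums hm.frame
  have obr := hm.sd.bits.OBR
  simp only [voff] at obr
  have hq1 : ∀ w, w ∈ ws → Quiet g w := fun w hw => (hq w hw).1
  have hfr' : Frame u₀ g pc' A s :=
    quiet_frame hm.frame hs hq1 hrip hrsp hcode hinv (hm.frame.shadow.untouched hun) hm.frame.offText hm.frame.ext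
  have harena : ArenaOK A.1 A.2 s.mem g.f := by
    apply hm.sd.arena.transfer
    apply window_objEq hs ?_ (by omega)
    intro w hw
    exact (hq w hw).2.2.1
  have hbits : Bits (g.Blk A) g.len s.mem g.f := by
    apply bits_quiet hm.sd.bits hs
    intro w hw
    exact (hq w hw).2.2.2
  have hz : ZeroRange s.mem g.f 32 48 := by
    apply zero_frame (hm.zero.mono (by omega) (by omega))
    apply window_objEq hs ?_ (by omega)
    intro w hw
    exact (hq w hw).2.1
  exact ⟨hfr', sdw_frame hm.sd (quiet_objEq hs hq1 (by omega)) (quiet_consts hm.sd.frame hs hq1 (by omega)) hun harena hbits,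
    hz⟩

/-! ### THE WALKS (machine level): loop 3676's round, the four parts A – D after the loop, and their composition.
The composition `seg5_of_failfix` takes `FailFix` (what a failed `setup_malloc` wrote: see its doc comment) as a HYPOTHESIS;
Proof.lean discharges it from the failure clause of `setup_malloc.spec`. -/

/-- One round of loop 3676 (`header[i] = get8_packet(f)`, `i ≤ 5`): from the head 0x113e77 back to it with `i + 1`: the call, the checked
byte store into the frame object `header`, `add r13d, 1`. -/
theorem body_step (Lay : Layout) (hLay : Lay.hi = 0x1000000) (μ : Microarch) (hμ : UserX.MicroOK μ) (u₀ : State)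
    (hcode : HasCodeNat Lay u₀ Vorbis.L.start_decoder.entry Vorbis.Code.code_start_decoder.nat Vorbis.L.start_decoder.size)
    (h_get8_packet : ∀ (others : List Obj) (frames : List (Nat × FrameLayout)) (Blk : Block → Prop) (len : Nat), Calls Lay μ Vorbis.WayInv (Vorbis.conv u₀) Vorbis.L.get8_packet.entry (Vorbis.Spec.get8_packet.spec others frames Blk len))
    (h_asan_store1_noabort : Asan.SmallCheck Lay μ Vorbis.WayInv (Vorbis.CodeOK u₀) [.rax, .rdx] 1 Vorbis.L.__asan_store1_noabort.entry)
    (g : Ghost) (A : Arena × List Obj) (i : Nat) (v : State) (hb : Body5 u₀ g A i v) (hi : i ≤ 5) :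
    ReachVia Lay μ WayInv v (fun w => Body5 u₀ g A (i + 1) w) := by
  have hfr := hb.frame
  have he := hfr.entry
  v_entry he
  simp only [depth, UInt64.reduceOfNat, Nat.reduceAdd] at he_room he_stack
  have hR : addr g.R = g.e.reg .rsp - 1480 := by
    unfold Ghost.R Ghost.RA addr steady
    u_omega
  have w_rip := hfr.rip
  have c_rsp := hfr.rsp
  rw [hR] at c_rsp
  have c_rbp := hb.rbp
  have c_r13 := hb.r13
  have w_eq : Mem.EqOn Vorbis.L.textLo Vorbis.L.textHi u₀.mem v.mem := hfr.code
  have hdf : v.flags .df = false := (show abiInv _ from hfr.inv).1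
  have hmx : v.mxcsr &&& 0x1F80 = 0x1F80 := (show abiInv _ from hfr.inv).2
  have hsse := Vorbis.sseOK_of_abiInv hfr.inv
  obtain ⟨n1, n2, n3, n4⟩ := frame_nums hfr
  obtain ⟨o1, o2, o3⟩ := obj_where5 hfr hb.hand
  have hRn : g.R = (g.e.reg .rsp).toNat - 1480 := rfl
  have hRAn : g.RA = (g.e.reg .rsp).toNat := rfl
  have hfa : (addr g.f).toNat = g.f := toNat_addr g.f (by omega)
  have obr := hb.sd.bits.OBR
  simp only [voff] at obr
  have hia : (addr i).toNat = i := toNat_addr i (by omega)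
  have hg8 := h_get8_packet A.2 g.frames' (g.Blk A) g.len
  u_walk hcode [hμ.vendor] until [Vorbis.L.start_decoder.cut42, Vorbis.L.start_decoder.cut50, Vorbis.L.start_decoder.cut4] span [Vorbis.L.textLo, Vorbis.L.textHi] side (v_side)
  · v_inv
  · -- the precondition of get8_packet: the shadow layer below the pushed return address, `ReaderEnv`, `Bits`
    have hun : ShadowUntouched v.mem s_113e54.mem := by v_untouched
    have hrsp8 : (s_113e54.reg .rsp).toNat + 8 = g.R := by
      rw [w_rsp]
      u_omega
    have hrdi : (s_113e54.reg .rdi).toNat = g.f := by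
      rw [w_rdi]
      exact hfa
    refine ⟨shadowPre_call hfr hrsp8 hun, ?_, ?_⟩
    · rw [hrdi]
      exact readerEnv hb.hand hb.sd.env.live
    · rw [hrdi, w_mem]
      exact (Vorbis.Spec.Reader.store_off_obj hb.sd.bits _ 8 _ (by u_omega) (by u_omega)).1.bits
  · v_after_call w_rsp_113e54 w_mem_113e54
    simp only [w_rdi_113e54, hfa] at w_same
    obtain ⟨z, w_rax⟩ : ∃ z, s_113e54r.reg .rax = z := ⟨_, rfl⟩
    u_walk hcode [hμ.vendor] until [Vorbis.L.start_decoder.cut42, Vorbis.L.start_decoder.cut50, Vorbis.L.start_decoder.cut4] span [Vorbis.L.textLo, Vorbis.L.textHi] side (v_side)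
    · -- the check of `header[i] = …`: the byte lies in the frame object `header`
      have hun : ShadowUntouched v.mem s_113e66.mem := by v_untouched
      rw [sext_small i (by omega)]
      refine Vorbis.check_small hfr.shadow hun (header_obj g A) (by decide) ?_ ?_
      · show g.R + 0x50 + 80 ≤ _
        u_omega
      · show _ ≤ g.R + 0x50 + 80 + 6
        u_omega
    · rw [sext_small i (by omega)]
      u_omega
    · -- back at the head 0x113e77 with `i + 1`
      rw [sext_small i (by omega)] at w_mem w_acc_113e66
      rw [inc_small i (by omega)] at w_r13
      have hs : Mem.SameExcept [⟨g.R - 296, g.R⟩, ⟨g.f + 48, g.f + 56⟩, ⟨g.f + 84, g.f + 96⟩, ⟨g.f + 136, g.f + 144⟩,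
          ⟨g.f + 1484, g.f + 1749⟩, ⟨g.f + 1752, g.f + 1764⟩, ⟨g.f + 1768, g.f + 1784⟩,
          ⟨g.R + 160 + i, g.R + 160 + i + 1⟩] v.mem s_113e73.mem := by
        u_same
      have hq : ∀ w, w ∈ [(⟨g.R - 296, g.R⟩ : Span), ⟨g.f + 48, g.f + 56⟩, ⟨g.f + 84, g.f + 96⟩, ⟨g.f + 136, g.f + 144⟩,
          ⟨g.f + 1484, g.f + 1749⟩, ⟨g.f + 1752, g.f + 1764⟩, ⟨g.f + 1768, g.f + 1784⟩,
          ⟨g.R + 160 + i, g.R + 160 + i + 1⟩] → Quiet g w := by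
        simp only [List.forall_mem_cons, List.not_mem_nil, false_imp_iff, implies_true, and_true, Quiet]
        omega
      have hun : ShadowUntouched v.mem s_113e73.mem := by v_untouched
      -- `Bits`: get8_packet's post, then the two stores off `*f` (the return address of the check call, the byte of `header`)
      have hpost : Get8PacketPost (g.Blk A) g.len g.f s_113e54 s_113e54r := by
        have h := w_post
        simp only [get8_packet.spec, w_rdi_113e54, hfa] at h
        exact h
      have hbits1 := (Vorbis.Spec.Reader.store_off_obj hpost.reader.bits (g.e.reg .rsp - 1488) 8 1130091 (by u_omega)
        (by u_omega)).1.bits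
      have hbits : Bits (g.Blk A) g.len s_113e73.mem g.f := by
        rw [w_mem]
        exact (Vorbis.Spec.Reader.store_off_obj hbits1 _ 1 _ (by u_omega) (by u_omega)).1.bits
      have harena : ArenaOK A.1 A.2 s_113e73.mem g.f := by
        apply hb.sd.arena.transfer
        apply window_objEq hs ?_ (by omega)
        simp only [List.forall_mem_cons, List.not_mem_nil, false_imp_iff, implies_true, and_true]
        omega
      have hz : ObjEq [(24, 48)] v.mem g.f s_113e73.mem g.f := by
        apply window_objEq hs ?_ (by omega)
        simp only [List.forall_mem_cons, List.not_mem_nil, false_imp_iff, implies_true, and_true]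
        omega
      have hinv : abiInv s_113e73 := by v_inv
      have hfr' : Frame u₀ g pc_5 A s_113e73 :=
        quiet_frame hfr hs hq w_rip (w_rsp.trans hR.symm) w_eq hinv (hfr.shadow.untouched hun) hfr.offText hfr.ext
      have hsd' := sd1_frame hb.sd (quiet_objEq hs hq (by omega)) hz (quiet_consts hb.sd.frame hs hq (by omega)) hun
        harena hbits
      refine ReachVia.done ⟨hfr', hb.hand, ?_, hsd', w_r13, by omega⟩
      rw [w_kept .rbp rfl]
      exact c_rbp
  · exfalso
    exact absurd ((le5_small i (by omega)).mpr hi) hbr_113e7b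

/-- Segment part A (0x113e77 with `i = 6` … the return of `vorbis_validate` at 0x113e8a; C line 3677). -/
theorem seg_a (Lay : Layout) (hLay : Lay.hi = 0x1000000) (μ : Microarch) (hμ : UserX.MicroOK μ) (u₀ : State)
    (hcode : HasCodeNat Lay u₀ Vorbis.L.start_decoder.entry Vorbis.Code.code_start_decoder.nat Vorbis.L.start_decoder.size)
    (h_vorbis_validate : ∀ (others : List Obj) (frames : List (Nat × FrameLayout)), Calls Lay μ Vorbis.WayInv (Vorbis.conv u₀) Vorbis.L.vorbis_validate.entry (Vorbis.Spec.vorbis_validate.spec others frames))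
    (g : Ghost) (A : Arena × List Obj) (v : State) (hb : Body5 u₀ g A 6 v) :
    ReachVia Lay μ WayInv v (fun w => AtInterior u₀ g A Vorbis.L.start_decoder.cut43 w) := by
  have hm := AtInterior.of_body hb
  have hfr := hm.frame
  have he := hfr.entry
  v_entry he
  simp only [depth, UInt64.reduceOfNat, Nat.reduceAdd] at he_room he_stack
  have hR : addr g.R = g.e.reg .rsp - 1480 := by
    unfold Ghost.R Ghost.RA addr steady
    u_omega
  have w_rip := hfr.rip
  have c_rsp := hfr.rsp
  rw [hR] at c_rsp
  have c_rbp := hm.rbp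
  have w_eq : Mem.EqOn Vorbis.L.textLo Vorbis.L.textHi u₀.mem v.mem := hfr.code
  have hdf : v.flags .df = false := (show abiInv _ from hfr.inv).1
  have hmx : v.mxcsr &&& 0x1F80 = 0x1F80 := (show abiInv _ from hfr.inv).2
  have hsse := Vorbis.sseOK_of_abiInv hfr.inv
  obtain ⟨n1, n2, n3, n4⟩ := frame_nums hfr
  obtain ⟨o1, o2, o3⟩ := obj_where5 hfr hm.hand
  have hRn : g.R = (g.e.reg .rsp).toNat - 1480 := rfl
  have hRAn : g.RA = (g.e.reg .rsp).toNat := rfl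
  have hfa : (addr g.f).toNat = g.f := toNat_addr g.f (by omega)
  have obr := hm.sd.bits.OBR
  simp only [voff] at obr
  have c_r13 : v.reg .r13 = addr 6 := hb.r13
  have hvv := h_vorbis_validate A.2 g.frames'
  u_walk hcode [hμ.vendor] until [Vorbis.L.start_decoder.cut42, Vorbis.L.start_decoder.cut50, Vorbis.L.start_decoder.cut4] span [Vorbis.L.textLo, Vorbis.L.textHi] side (v_side)
  · v_inv
  · -- the precondition of vorbis_validate: `header` is a live object of the own frame, the global `vorbis` a live object
    have hun : ShadowUntouched v.mem s_113e85.mem := by v_untouched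
    have hrsp8 : (s_113e85.reg .rsp).toNat + 8 = g.R := by
      rw [w_rsp]
      u_omega
    refine ⟨shadowPre_call hfr hrsp8 hun, ?_, ?_⟩
    · refine ⟨_, header_obj g A, ?_, ?_⟩
      · show g.R + 0x50 + 80 ≤ _
        rw [w_rdi]
        u_omega
      · show _ ≤ g.R + 0x50 + 80 + 6
        rw [w_rdi]
        u_omega
    · refine ⟨Vorbis.Globals.vorbis.obj, List.mem_append_right _ (hm.hand.globals _ (by decide)), Nat.le_refl _, Nat.le_refl _⟩
  · -- `i = 6`: the loop is left
    exfalso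
    exact absurd ((le5_small 6 (by omega)).mp hbr_113e7b) (by omega)
  · v_after_call w_rsp_113e85 w_mem_113e85
    obtain ⟨hrax, hunp⟩ := w_post
    have hs : Mem.SameExcept [⟨g.R - 104, g.R⟩] v.mem s_113e85r.mem := by
      u_same
    have hq : ∀ w, w ∈ [(⟨g.R - 104, g.R⟩ : Span)] → Quiet2 g w := by
      simp only [List.forall_mem_cons, List.not_mem_nil, false_imp_iff, implies_true, and_true, Quiet2, Quiet]
      omega
    have hun : ShadowUntouched v.mem s_113e85r.mem := by v_untouched
    have hbits : Bits (g.Blk A) g.len s_113e85r.mem g.f := by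
      apply bits_quiet hm.sd.bits hs
      simp only [List.forall_mem_cons, List.not_mem_nil, false_imp_iff, implies_true, and_true]
      omega
    have hrbp : s_113e85r.reg .rbp = addr g.f := by
      rw [w_kept .rbp rfl]
      exact c_rbp
    exact ReachVia.done (hm.step hs hq hun hbits w_rip (w_rsp.trans hR.symm) w_eq w_inv hrbp)

/-- Segment part B (0x113e8a … the return of `get32_packet` at 0x113e96, or `error(f, VORBIS_invalid_setup)` of line 3677). -/
theorem seg_b (Lay : Layout) (hLay : Lay.hi = 0x1000000) (μ : Microarch) (hμ : UserX.MicroOK μ) (u₀ : State)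
    (hcode : HasCodeNat Lay u₀ Vorbis.L.start_decoder.entry Vorbis.Code.code_start_decoder.nat Vorbis.L.start_decoder.size)
    (h_get32_packet : ∀ (others : List Obj) (frames : List (Nat × FrameLayout)) (Blk : Block → Prop) (len : Nat), Calls Lay μ Vorbis.WayInv (Vorbis.conv u₀) Vorbis.L.get32_packet.entry (Vorbis.Spec.get32_packet.spec others frames Blk len))
    (h_error : ∀ (others : List Obj) (frames : List (Nat × FrameLayout)), Calls Lay μ Vorbis.WayInv (Vorbis.conv u₀) Vorbis.L.error.entry (Vorbis.Spec.error.spec others frames))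
    (g : Ghost) (A : Arena × List Obj) (v : State) (hm : AtInterior u₀ g A Vorbis.L.start_decoder.cut43 v) :
    ReachVia Lay μ WayInv v (fun w => (AtInterior u₀ g A Vorbis.L.start_decoder.cut44 w ∧ (w.reg .rax).toNat < 2 ^ 32) ∨
      AtERR u₀ g w) := by
  have hfr := hm.frame
  have he := hfr.entry
  v_entry he
  simp only [depth, UInt64.reduceOfNat, Nat.reduceAdd] at he_room he_stack
  have hR : addr g.R = g.e.reg .rsp - 1480 := by
    unfold Ghost.R Ghost.RA addr steady
    u_omega
  have w_rip := hfr.rip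
  have c_rsp := hfr.rsp
  rw [hR] at c_rsp
  have c_rbp := hm.rbp
  have w_eq : Mem.EqOn Vorbis.L.textLo Vorbis.L.textHi u₀.mem v.mem := hfr.code
  have hdf : v.flags .df = false := (show abiInv _ from hfr.inv).1
  have hmx : v.mxcsr &&& 0x1F80 = 0x1F80 := (show abiInv _ from hfr.inv).2
  have hsse := Vorbis.sseOK_of_abiInv hfr.inv
  obtain ⟨n1, n2, n3, n4⟩ := frame_nums hfr
  obtain ⟨o1, o2, o3⟩ := obj_where5 hfr hm.hand
  have hRn : g.R = (g.e.reg .rsp).toNat - 1480 := rfl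
  have hRAn : g.RA = (g.e.reg .rsp).toNat := rfl
  have hfa : (addr g.f).toNat = g.f := toNat_addr g.f (by omega)
  have obr := hm.sd.bits.OBR
  simp only [voff] at obr
  have hg32 := h_get32_packet A.2 g.frames' (g.Blk A) g.len
  have herr := h_error A.2 g.frames'
  obtain ⟨z, c_rax⟩ : ∃ z, v.reg .rax = z := ⟨_, rfl⟩
  u_walk hcode [hμ.vendor] until [Vorbis.L.start_decoder.cut42, Vorbis.L.start_decoder.cut50, Vorbis.L.start_decoder.cut4] span [Vorbis.L.textLo, Vorbis.L.textHi] side (v_side)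
  · v_inv
  · -- the precondition of `error`: the shadow layer, `*f` inside one live object
    have hun : ShadowUntouched v.mem s_113ed0.mem := by v_untouched
    have hrsp8 : (s_113ed0.reg .rsp).toNat + 8 = g.R := by
      rw [w_rsp]
      u_omega
    refine ⟨shadowPre_call hfr hrsp8 hun, ?_⟩
    rw [w_rdi, hfa]
    exact hm.hand.obj.mono (sub_frames' g A)
  · v_inv
  · -- the precondition of get32_packet
    have hun : ShadowUntouched v.mem s_113e91.mem := by v_untouched
    have hrsp8 : (s_113e91.reg .rsp).toNat + 8 = g.R := by
      rw [w_rsp]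
      u_omega
    have hrdi : (s_113e91.reg .rdi).toNat = g.f := by
      rw [w_rdi]
      exact hfa
    refine ⟨shadowPre_call hfr hrsp8 hun, ?_, ?_⟩
    · rw [hrdi]
      exact readerEnv hm.hand hm.sd.env.live
    · rw [hrdi, w_mem]
      exact (Vorbis.Spec.Reader.store_off_obj hm.sd.bits _ 8 _ (by u_omega) (by u_omega)).1.bits
  · -- after `error` returned: `jmp 113b22`
    v_after_call w_rsp_113ed0 w_mem_113ed0
    simp only [w_rdi_113ed0, hfa, voff] at w_same
    obtain ⟨hrax0, hunp, _⟩ := w_post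
    have w_rax := hrax0
    u_walk hcode [hμ.vendor] until [Vorbis.L.start_decoder.cut42, Vorbis.L.start_decoder.cut50, Vorbis.L.start_decoder.cut4] span [Vorbis.L.textLo, Vorbis.L.textHi] side (v_side)
    have hs : Mem.SameExcept [⟨g.R - 56, g.R⟩, ⟨g.f + 140, g.f + 144⟩] v.mem s_113ed5.mem := by
      u_same
    have hq : ∀ w, w ∈ [(⟨g.R - 56, g.R⟩ : Span), ⟨g.f + 140, g.f + 144⟩] → Quiet2 g w := by
      simp only [List.forall_mem_cons, List.not_mem_nil, false_imp_iff, implies_true, and_true, Quiet2, Quiet]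
      omega
    have hun : ShadowUntouched v.mem s_113ed5.mem := by v_untouched
    have hbits : Bits (g.Blk A) g.len s_113ed5.mem g.f := by
      apply bits_quiet hm.sd.bits hs
      simp only [List.forall_mem_cons, List.not_mem_nil, false_imp_iff, implies_true, and_true]
      omega
    have hrbp : s_113ed5.reg .rbp = addr g.f := by
      rw [w_kept .rbp rfl]
      exact c_rbp
    have hinv : abiInv s_113ed5 := by v_inv
    have hmid : AtInterior u₀ g A pc_ERR s_113ed5 :=
      hm.step hs hq hun hbits w_rip (w_rsp.trans hR.symm) w_eq hinv hrbp
    exact ReachVia.done (Or.inr (hmid.err w_rax))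
  · -- after get32_packet returned
    v_after_call w_rsp_113e91 w_mem_113e91
    simp only [w_rdi_113e91, hfa] at w_same
    have hpost : Get32PacketPost (g.Blk A) g.len g.f s_113e91 s_113e91r := by
      have h := w_post
      simp only [get32_packet.spec, w_rdi_113e91, hfa] at h
      exact h
    have hs : Mem.SameExcept [⟨g.R - 328, g.R⟩, ⟨g.f + 48, g.f + 56⟩, ⟨g.f + 84, g.f + 96⟩, ⟨g.f + 136, g.f + 144⟩,
        ⟨g.f + 1484, g.f + 1749⟩, ⟨g.f + 1752, g.f + 1764⟩, ⟨g.f + 1768, g.f + 1784⟩] v.mem s_113e91r.mem := by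
      u_same
    have hq : ∀ w, w ∈ [(⟨g.R - 328, g.R⟩ : Span), ⟨g.f + 48, g.f + 56⟩, ⟨g.f + 84, g.f + 96⟩, ⟨g.f + 136, g.f + 144⟩,
        ⟨g.f + 1484, g.f + 1749⟩, ⟨g.f + 1752, g.f + 1764⟩, ⟨g.f + 1768, g.f + 1784⟩] → Quiet2 g w := by
      simp only [List.forall_mem_cons, List.not_mem_nil, false_imp_iff, implies_true, and_true, Quiet2, Quiet]
      omega
    have hun : ShadowUntouched v.mem s_113e91r.mem := by v_untouched
    have hrbp : s_113e91r.reg .rbp = addr g.f := by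
      rw [w_kept .rbp rfl]
      exact c_rbp
    exact ReachVia.done (Or.inl ⟨hm.step hs hq hun hpost.reader.bits w_rip (w_rsp.trans hR.symm) w_eq w_inv hrbp,
      hpost.result⟩)

/-- Segment part C (0x113e96 … the return of `setup_malloc` at 0x113eab, or `error(f, VORBIS_invalid_setup)` of FIX 1, line 3679),
GIVEN what a failed `setup_malloc` wrote (`FailFix`). -/
theorem seg_c (Lay : Layout) (hLay : Lay.hi = 0x1000000) (μ : Microarch) (hμ : UserX.MicroOK μ) (u₀ : State)
    (hcode : HasCodeNat Lay u₀ Vorbis.L.start_decoder.entry Vorbis.Code.code_start_decoder.nat Vorbis.L.start_decoder.size)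
    (h_setup_malloc : ∀ (others : List Obj) (frames : List (Nat × FrameLayout)) (A : Arena), Calls Lay μ Vorbis.WayInv (Vorbis.conv u₀) Vorbis.L.setup_malloc.entry (Vorbis.Spec.setup_malloc.spec others frames A))
    (h_error : ∀ (others : List Obj) (frames : List (Nat × FrameLayout)), Calls Lay μ Vorbis.WayInv (Vorbis.conv u₀) Vorbis.L.error.entry (Vorbis.Spec.error.spec others frames))
    (g : Ghost) (A : Arena × List Obj) (hfix : FailFix g A) (v : State)
    (hm : AtInterior u₀ g A Vorbis.L.start_decoder.cut44 v) (hlt : (v.reg .rax).toNat < 2 ^ 32) :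
    ReachVia Lay μ WayInv v (fun w => (∃ A' len, AtAlloc u₀ g A' len w) ∨ AtERR u₀ g w) := by
  have hfr := hm.frame
  have he := hfr.entry
  v_entry he
  simp only [depth, UInt64.reduceOfNat, Nat.reduceAdd] at he_room he_stack
  have hR : addr g.R = g.e.reg .rsp - 1480 := by
    unfold Ghost.R Ghost.RA addr steady
    u_omega
  have w_rip := hfr.rip
  have c_rsp := hfr.rsp
  rw [hR] at c_rsp
  have c_rbp := hm.rbp
  have w_eq : Mem.EqOn Vorbis.L.textLo Vorbis.L.textHi u₀.mem v.mem := hfr.code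
  have hdf : v.flags .df = false := (show abiInv _ from hfr.inv).1
  have hmx : v.mxcsr &&& 0x1F80 = 0x1F80 := (show abiInv _ from hfr.inv).2
  have hsse := Vorbis.sseOK_of_abiInv hfr.inv
  obtain ⟨n1, n2, n3, n4⟩ := frame_nums hfr
  obtain ⟨o1, o2, o3⟩ := obj_where5 hfr hm.hand
  have hRn : g.R = (g.e.reg .rsp).toNat - 1480 := rfl
  have hRAn : g.RA = (g.e.reg .rsp).toNat := rfl
  have hfa : (addr g.f).toNat = g.f := toNat_addr g.f (by omega)
  have obr := hm.sd.bits.OBR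
  simp only [voff] at obr
  have hsm := h_setup_malloc A.2 g.frames' A.1
  have herr := h_error A.2 g.frames'
  obtain ⟨z, c_rax⟩ : ∃ z, v.reg .rax = z := ⟨_, rfl⟩
  rw [c_rax] at hlt
  have hz32 := part32_small z hlt
  u_walk hcode [hμ.vendor] until [Vorbis.L.start_decoder.cut42, Vorbis.L.start_decoder.cut50, Vorbis.L.start_decoder.cut4] span [Vorbis.L.textLo, Vorbis.L.textHi] side (v_side)
  · v_inv
  · -- the precondition of `error`
    have hun : ShadowUntouched v.mem s_113ee2.mem := by v_untouched
    have hrsp8 : (s_113ee2.reg .rsp).toNat + 8 = g.R := by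
      rw [w_rsp]
      u_omega
    refine ⟨shadowPre_call hfr hrsp8 hun, ?_⟩
    rw [w_rdi, hfa]
    exact hm.hand.obj.mono (sub_frames' g A)
  · v_inv
  · -- the precondition of setup_malloc: the shadow layer, OB1, the arena layer (over the pushed return address), the arena above the text
    have hun : ShadowUntouched v.mem s_113ea6.mem := by v_untouched
    have hrsp8 : (s_113ea6.reg .rsp).toNat + 8 = g.R := by
      rw [w_rsp]
      u_omega
    have hrdi : (s_113ea6.reg .rdi).toNat = g.f := by
      rw [w_rdi]
      exact hfa
    refine ⟨shadowPre_call hfr hrsp8 hun, ?_, ?_, hm.hand.arenaText⟩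
    · rw [hrdi]
      exact hm.sd.env.live _ hm.sd.bits.OB1
    · rw [hrdi, w_mem]
      apply hm.sd.arena.transfer
      apply ObjEq.of_writeLE _ _ _ 8 _ (by u_omega)
      · intro w hw
        simp only [ArenaFields.wins, List.mem_singleton] at hw
        subst hw
        simp only []
        omega
      · intro w hw
        simp only [ArenaFields.wins, List.mem_singleton] at hw
        subst hw
        simp only []
        u_omega
  · -- after `error` returned: `jmp 113b22`
    v_after_call w_rsp_113ee2 w_mem_113ee2
    simp only [w_rdi_113ee2, hfa, voff] at w_same
    obtain ⟨hrax0, hunp, _⟩ := w_post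
    have w_rax := hrax0
    u_walk hcode [hμ.vendor] until [Vorbis.L.start_decoder.cut42, Vorbis.L.start_decoder.cut50, Vorbis.L.start_decoder.cut4] span [Vorbis.L.textLo, Vorbis.L.textHi] side (v_side)
    have hs : Mem.SameExcept [⟨g.R - 56, g.R⟩, ⟨g.f + 140, g.f + 144⟩] v.mem s_113ee7.mem := by
      u_same
    have hq : ∀ w, w ∈ [(⟨g.R - 56, g.R⟩ : Span), ⟨g.f + 140, g.f + 144⟩] → Quiet2 g w := by
      simp only [List.forall_mem_cons, List.not_mem_nil, false_imp_iff, implies_true, and_true, Quiet2, Quiet]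
      omega
    have hun : ShadowUntouched v.mem s_113ee7.mem := by v_untouched
    have hbits : Bits (g.Blk A) g.len s_113ee7.mem g.f := by
      apply bits_quiet hm.sd.bits hs
      simp only [List.forall_mem_cons, List.not_mem_nil, false_imp_iff, implies_true, and_true]
      omega
    have hrbp : s_113ee7.reg .rbp = addr g.f := by
      rw [w_kept .rbp rfl]
      exact c_rbp
    have hinv : abiInv s_113ee7 := by v_inv
    have hmid : AtInterior u₀ g A pc_ERR s_113ee7 :=
      hm.step hs hq hun hbits w_rip (w_rsp.trans hR.symm) w_eq hinv hrbp
    exact ReachVia.done (Or.inr (hmid.err w_rax))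
  · -- after setup_malloc returned
    have hn : (s_113ea6.reg .rsi).toNat % 2 ^ 32 = z.toNat + 1 := by
      rw [w_rsi_113ea6]
      exact size_arg z (by omega)
    have w_same0 := w_same
    have hpost0 := w_post
    v_after_call w_rsp_113ea6 w_mem_113ea6
    simp only [w_rdi_113ea6, hfa, hn] at w_same
    have hpost := w_post
    simp only [setup_malloc.spec, hn, w_rdi_113ea6, hfa] at hpost
    obtain ⟨hyes, hno⟩ := hpost
    have hrbp : s_113ea6r.reg .rbp = addr g.f := by
      rw [w_kept .rbp rfl]
      exact c_rbp
    have hr13 : s_113ea6r.reg .r13 = addr z.toNat := by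
      rw [w_r13, Vorbis.Spec.Reader.ofBV_part32_of_lt z hlt]
      exact (UInt64.ofNat_toNat).symm
    have hrsp8 : (s_113ea6.reg .rsp).toNat + 8 = g.R := by
      rw [w_rsp_113ea6]
      u_omega
    by_cases hfit : A.1.Fits (z.toNat + 1)
    · -- success: the ghost arena grows by the vendor block
      obtain ⟨hrax, harena', hsh'⟩ := hyes hfit
      rw [hrsp8] at hsh'
      have hs : Mem.SameExcept (allocSpans g A.1 (z.toNat + 1)) v.mem s_113ea6r.mem := by
        unfold allocSpans
        u_same
      obtain ⟨k1, k2, k3, k4, k5⟩ := alloc_success hm hs hfit harena' hsh' w_rip (w_rsp.trans hR.symm) w_eq w_inv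
      refine ReachVia.done (Or.inl ⟨_, z.toNat, k1, k2, hrbp, k3, ?_, k4, hr13, by omega, Or.inr ⟨?_, ?_⟩⟩)
      · simp only [varena]
        exact hm.sd.noTemps
      · have := hm.sd.arena.AR1
        omega
      · have e : (s_113ea6r.reg .rax).toNat = A.1.B + (A.1.S + 32) := by omega
        rw [e]
        exact k5
    · -- failure: NULL, nothing but the stack, `setup_memory_required` (and `setup_offset`'s window) written
      obtain ⟨hrax, harena', hunp, _⟩ := hno hfit
      have hnf : ¬ A.1.Fits ((s_113ea6.reg .rsi).toNat % 2 ^ 32) := by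
        rw [hn]
        exact hfit
      have w_same := hfix s_113ea6 s_113ea6r hpost0 w_same0 hnf
      simp only [w_rsp_113ea6, w_rdi_113ea6, hfa] at w_same
      rw [w_mem_113ea6] at w_same
      have hs : Mem.SameExcept (failSpans g) v.mem s_113ea6r.mem := by
        unfold failSpans
        u_same
      have hun : ShadowUntouched v.mem s_113ea6r.mem := by
        have h1 : ShadowUntouched v.mem s_113ea6.mem := by
          rw [w_mem_113ea6]
          v_untouched
        exact h1.trans hunp
      obtain ⟨k1, k3, k4⟩ := alloc_failure hm hs hun harena' w_rip (w_rsp.trans hR.symm) w_eq w_inv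
      exact ReachVia.done (Or.inl ⟨A, z.toNat, k1, hm.hand, hrbp, k3, hm.sd.noTemps, k4, hr13, by omega, Or.inl hrax⟩)

/-- Segment part D (0x113eab … the head of loop 3682 at 0x113f28, or `error(f, VORBIS_outofmem)` of line 3681): `f->vendor = …`
(checked store), the NULL test. -/
theorem seg_d (Lay : Layout) (hLay : Lay.hi = 0x1000000) (μ : Microarch) (hμ : UserX.MicroOK μ) (u₀ : State)
    (hcode : HasCodeNat Lay u₀ Vorbis.L.start_decoder.entry Vorbis.Code.code_start_decoder.nat Vorbis.L.start_decoder.size)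
    (h_asan_store8_noabort : Asan.SmallCheck Lay μ Vorbis.WayInv (Vorbis.CodeOK u₀) [.rax, .rcx, .rdx] 8 Vorbis.L.__asan_store8_noabort.entry)
    (h_error : ∀ (others : List Obj) (frames : List (Nat × FrameLayout)), Calls Lay μ Vorbis.WayInv (Vorbis.conv u₀) Vorbis.L.error.entry (Vorbis.Spec.error.spec others frames))
    (g : Ghost) (A : Arena × List Obj) (len : Nat) (v : State) (hm : AtAlloc u₀ g A len v) :
    ReachVia Lay μ WayInv v (fun w => At6 u₀ g w ∨ AtERR u₀ g w) := by
  have hfr := hm.frame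
  have he := hfr.entry
  v_entry he
  simp only [depth, UInt64.reduceOfNat, Nat.reduceAdd] at he_room he_stack
  have hR : addr g.R = g.e.reg .rsp - 1480 := by
    unfold Ghost.R Ghost.RA addr steady
    u_omega
  have w_rip := hfr.rip
  have c_rsp := hfr.rsp
  rw [hR] at c_rsp
  have c_rbp := hm.rbp
  have w_eq : Mem.EqOn Vorbis.L.textLo Vorbis.L.textHi u₀.mem v.mem := hfr.code
  have hdf : v.flags .df = false := (show abiInv _ from hfr.inv).1
  have hmx : v.mxcsr &&& 0x1F80 = 0x1F80 := (show abiInv _ from hfr.inv).2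
  have hsse := Vorbis.sseOK_of_abiInv hfr.inv
  obtain ⟨n1, n2, n3, n4⟩ := frame_nums hfr
  obtain ⟨o1, o2, o3⟩ := obj_where5 hfr hm.hand
  have hRn : g.R = (g.e.reg .rsp).toNat - 1480 := rfl
  have hRAn : g.RA = (g.e.reg .rsp).toNat := rfl
  have hfa : (addr g.f).toNat = g.f := toNat_addr g.f (by omega)
  have obr := hm.sd.bits.OBR
  simp only [voff] at obr
  have herr := h_error A.2 g.frames'
  obtain ⟨z, c_rax⟩ : ∃ z, v.reg .rax = z := ⟨_, rfl⟩
  have c_r13 := hm.r13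
  have hres := hm.result
  rw [c_rax] at hres
  u_walk hcode [hμ.vendor] until [Vorbis.L.start_decoder.cut42, Vorbis.L.start_decoder.cut50, Vorbis.L.start_decoder.cut4] span [Vorbis.L.textLo, Vorbis.L.textHi] side (v_side)
  · -- the check of `f->vendor = …`: the field lies in `*f`, one live object
    have hun : ShadowUntouched v.mem s_113eb2.mem := by v_untouched
    have hl := hm.hand.obj.mono (sub_frames' g A)
    simp only [voff] at hl
    exact hl.accSmall hfr.shadow hun _ 8 (by decide) (by u_omega) (by u_omega)
  · v_inv
  · -- the precondition of `error`
    have hun : ShadowUntouched v.mem s_113ef4.mem := by v_untouched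
    have hrsp8 : (s_113ef4.reg .rsp).toNat + 8 = g.R := by
      rw [w_rsp]
      u_omega
    refine ⟨shadowPre_call hfr hrsp8 hun, ?_⟩
    rw [w_rdi, hfa]
    exact hm.hand.obj.mono (sub_frames' g A)
  · -- `f->vendor == NULL`: after `error(f, VORBIS_outofmem)` returned, `jmp 113b22`
    v_after_call w_rsp_113ef4 w_mem_113ef4
    simp only [w_rdi_113ef4, hfa, voff] at w_same
    obtain ⟨hrax0, hunp, _⟩ := w_post
    have w_rax := hrax0
    u_walk hcode [hμ.vendor] until [Vorbis.L.start_decoder.cut42, Vorbis.L.start_decoder.cut50, Vorbis.L.start_decoder.cut4] span [Vorbis.L.textLo, Vorbis.L.textHi] side (v_side)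
    have hs : Mem.SameExcept [⟨g.R - 56, g.R⟩, ⟨g.f + 24, g.f + 32⟩, ⟨g.f + 140, g.f + 144⟩] v.mem s_113ef9.mem := by
      u_same
    have hq : ∀ w, w ∈ [(⟨g.R - 56, g.R⟩ : Span), ⟨g.f + 24, g.f + 32⟩, ⟨g.f + 140, g.f + 144⟩] → Quiet3 g w := by
      simp only [List.forall_mem_cons, List.not_mem_nil, false_imp_iff, implies_true, and_true, Quiet3, Quiet]
      omega
    have hun : ShadowUntouched v.mem s_113ef9.mem := by v_untouched
    have hinv : abiInv s_113ef9 := by v_inv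
    obtain ⟨k1, k2, k3⟩ := hm.step hs hq hun w_rip (w_rsp.trans hR.symm) w_eq hinv
    have h1 : H1 (g.Blk A) s_113ef9.mem g.f := by
      left
      have e : stb_vorbis.comment_list_length s_113ef9.mem g.f = 0 := by
        simp only [vacc, voff]
        exact k3.i32 32 (by omega) (by omega)
      omega
    refine ReachVia.done (Or.inr ⟨A, k1, hm.hand, Or.inl ⟨?_, SDw.failed k2 (by omega) h1⟩⟩)
    rw [w_rax]
    rfl
  · -- `f->vendor != NULL`: `i = 0`, on to the head of loop 3682
    have hs : Mem.SameExcept [⟨g.R - 8, g.R⟩, ⟨g.f + 24, g.f + 32⟩] v.mem s_113ec6.mem := by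
      u_same
    have hq : ∀ w, w ∈ [(⟨g.R - 8, g.R⟩ : Span), ⟨g.f + 24, g.f + 32⟩] → Quiet3 g w := by
      simp only [List.forall_mem_cons, List.not_mem_nil, false_imp_iff, implies_true, and_true, Quiet3, Quiet]
      omega
    have hun : ShadowUntouched v.mem s_113ec6.mem := by v_untouched
    have hinv : abiInv s_113ec6 := by v_inv
    obtain ⟨k1, k2, k3⟩ := hm.step hs hq hun w_rip (w_rsp.trans hR.symm) w_eq hinv
    have hblk : A.1.Blk ⟨z.toNat, len + 1⟩ := by
      rcases hres with h0 | ⟨_, hb⟩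
      · rw [h0] at hbr_113ebe
        exact absurd rfl hbr_113ebe
      · exact hb
    have ev : stb_vorbis.vendor s_113ec6.mem g.f = z.toNat := by
      have ea : addr g.f + 24 = addr (g.f + 24) := by
        unfold addr
        rw [UInt64.ofNat_add]
        rfl
      simp only [vacc, voff]
      show s_113ec6.mem.readLE (addr (g.f + 24)) 8 = _
      rw [w_mem, ea, Mem.readLE_writeLE_same _ _ 8 _ (by decide)]
      have := z.toNat_lt
      omega
    refine ReachVia.done (Or.inl ⟨A, 0, len, k1, hm.hand, ?_, k2, hm.noTemps, w_r12, ?_, by omega, hm.len_le, ?_, ?_, ?_⟩)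
    · rw [w_kept .rbp rfl]
      exact c_rbp
    · rw [w_kept .r13 rfl]
      exact c_r13
    · rw [ev]
      exact hblk
    · simp only [vacc, voff]
      exact k3.i32 32 (by omega) (by omega)
    · simp only [vacc, voff]
      exact k3.ptr 40 (by omega) (by omega)

/-- **Segment `start_decoder.5`, GIVEN what a failed `setup_malloc` wrote** (`FailFix`, for every ghost arena):
loop 3676 by `ReachVia.loop` (invariant `At5`, measure `7 − i`), then the four parts A – D in sequence. -/
theorem seg5_of_failfix (Lay : Layout) (hLay : Lay.hi = 0x1000000) (μ : Microarch) (hμ : UserX.MicroOK μ) (u₀ : State)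
    (hcode : HasCodeNat Lay u₀ Vorbis.L.start_decoder.entry Vorbis.Code.code_start_decoder.nat Vorbis.L.start_decoder.size)
    (h_get8_packet : ∀ (others : List Obj) (frames : List (Nat × FrameLayout)) (Blk : Block → Prop) (len : Nat), Calls Lay μ Vorbis.WayInv (Vorbis.conv u₀) Vorbis.L.get8_packet.entry (Vorbis.Spec.get8_packet.spec others frames Blk len))
    (h_asan_store1_noabort : Asan.SmallCheck Lay μ Vorbis.WayInv (Vorbis.CodeOK u₀) [.rax, .rdx] 1 Vorbis.L.__asan_store1_noabort.entry)
    (h_vorbis_validate : ∀ (others : List Obj) (frames : List (Nat × FrameLayout)), Calls Lay μ Vorbis.WayInv (Vorbis.conv u₀) Vorbis.L.vorbis_validate.entry (Vorbis.Spec.vorbis_validate.spec others frames))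
    (h_get32_packet : ∀ (others : List Obj) (frames : List (Nat × FrameLayout)) (Blk : Block → Prop) (len : Nat), Calls Lay μ Vorbis.WayInv (Vorbis.conv u₀) Vorbis.L.get32_packet.entry (Vorbis.Spec.get32_packet.spec others frames Blk len))
    (h_setup_malloc : ∀ (others : List Obj) (frames : List (Nat × FrameLayout)) (A : Arena), Calls Lay μ Vorbis.WayInv (Vorbis.conv u₀) Vorbis.L.setup_malloc.entry (Vorbis.Spec.setup_malloc.spec others frames A))
    (h_asan_store8_noabort : Asan.SmallCheck Lay μ Vorbis.WayInv (Vorbis.CodeOK u₀) [.rax, .rcx, .rdx] 8 Vorbis.L.__asan_store8_noabort.entry)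
    (h_error : ∀ (others : List Obj) (frames : List (Nat × FrameLayout)), Calls Lay μ Vorbis.WayInv (Vorbis.conv u₀) Vorbis.L.error.entry (Vorbis.Spec.error.spec others frames))
    (hfix : ∀ (g : Ghost) (A : Arena × List Obj), FailFix g A) : Vorbis.Spec.StartDecoder.Seg5 Lay μ u₀ := by
  intro g
  refine ReachVia.loop (Inv := fun v => At5 u₀ g v) (Post := fun w => At6 u₀ g w ∨ AtERR u₀ g w)
    (fun v => 7 - (v.reg .r13).toNat) ?_
  intro v hat
  obtain ⟨A, i, hb⟩ := hat
  have hi6 := hb.i_le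
  have e13 : (v.reg .r13).toNat = i := by
    rw [hb.r13]
    exact toNat_addr i (by omega)
  by_cases hi : i ≤ 5
  · -- one more round
    refine (body_step Lay hLay μ hμ u₀ hcode h_get8_packet h_asan_store1_noabort g A i v hb hi).mono ?_
    intro w hw
    have e13' : (w.reg .r13).toNat = i + 1 := by
      rw [hw.r13]
      exact toNat_addr (i + 1) (by omega)
    refine Or.inr ⟨⟨A, i + 1, hw⟩, ?_⟩
    show 7 - (w.reg .r13).toNat < 7 - (v.reg .r13).toNat
    omega
  · -- `i = 6`: the loop is left
    have e6 : i = 6 := by omega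
    subst e6
    refine (seg_a Lay hLay μ hμ u₀ hcode h_vorbis_validate g A v hb).trans ?_
    intro w1 h1
    refine (seg_b Lay hLay μ hμ u₀ hcode h_get32_packet h_error g A w1 h1).trans ?_
    intro w2 h2
    rcases h2 with ⟨h2m, h2r⟩ | h2e
    · refine (seg_c Lay hLay μ hμ u₀ hcode h_setup_malloc h_error g A (hfix g A) w2 h2m h2r).trans ?_
      intro w3 h3
      rcases h3 with ⟨A', len, h3a⟩ | h3e
      · refine (seg_d Lay hLay μ hμ u₀ hcode h_asan_store8_noabort h_error g A' len w3 h3a).mono ?_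
        intro w4 h4
        exact Or.inl h4
      · exact ReachVia.done (Or.inl (Or.inr h3e))
    · exact ReachVia.done (Or.inl (Or.inr h2e))


end Vorbis.Spec.start_decoder_5
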